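-- pv_equiv track=rewrite | github.com/adamkrellenstein/MeterMeter | nvim/metermeter.nvim/python/metermeter_cli.py | _even_spans
-- ===== SOURCE A (Python) =====
-- from typing import Dict, List, Optional, Tuple
--
-- def _even_spans(length: int, target: int) -> List[Tuple[int, int]]:
--     if length <= 0:
--         return []
--     target = max(1, min(int(target), int(length)))
--     out: List[Tuple[int, int]] = []
--     for idx in range(target):
--         start = (idx * length) // target
--         end = ((idx + 1) * length) // target
--         if end <= start:
--             end = min(length, start + 1)
--         out.append((start, end))
--     return out
-- ===== SOURCE B (Python) =====
-- def _even_spans(length: int, target: int):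
--     if length <= 0:
--         return []
--     target = max(1, min(int(target), int(length)))
--     base, rem = divmod(length, target)
--     out = []
--     start = 0
--     acc = 0
--     for _ in range(target):
--         size = base
--         acc += rem
--         if acc >= target:
--             acc -= target
--             size += 1
--         out.append((start, start + size))
--         start += size
--     return out
-- ===== Notes on version B (the rewrite author's own statement) =====
-- stated objective: alternative
-- what changed: Replaces the per-index idx*length//target floor-division formula by one divmod plus an integer error accumulator that carries the remainder incrementally while advancing a running start position.
import Mathlib
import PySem

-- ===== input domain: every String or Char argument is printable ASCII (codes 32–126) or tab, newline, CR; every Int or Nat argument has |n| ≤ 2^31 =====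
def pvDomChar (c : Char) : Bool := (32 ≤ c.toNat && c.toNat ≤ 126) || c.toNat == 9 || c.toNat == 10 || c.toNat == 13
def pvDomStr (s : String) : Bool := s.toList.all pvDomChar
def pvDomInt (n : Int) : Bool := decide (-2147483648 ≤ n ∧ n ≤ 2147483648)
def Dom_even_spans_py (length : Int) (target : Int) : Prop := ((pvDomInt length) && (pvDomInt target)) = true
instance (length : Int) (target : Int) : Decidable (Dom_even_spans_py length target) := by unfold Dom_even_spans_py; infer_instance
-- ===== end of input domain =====

-- B replaces the per-index floor-division formula by a single divmod plus an
-- integer error accumulator that carries the remainder incrementally (same spans, no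
-- per-step multiplication/division); objective: alternative decomposition.

-- ===== PORT A =====
-- loop body of A: start/end by floor division, with A's (dead) end<=start guard kept literally
def pvStepA (L t : Int) (out : List (Int × Int)) (idx : Int) : List (Int × Int) :=
  let start := PySem.Int.floordiv (idx * L) t
  let e := PySem.Int.floordiv ((idx + 1) * L) t
  let e := if e ≤ start then min L (start + 1) else e
  out ++ [(start, e)]

def even_spans_py (length : Int) (target : Int) : List (Int × Int) :=
  if length ≤ 0 then []
  else
    let t := max 1 (min target length)
    (PySem.List.pyRange 0 t 1).foldl (pvStepA length t) []

-- ===== PORT B =====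
-- loop body of B: advance (start, acc, out); add rem to acc, carry 1 into size when acc ≥ t
def pvStepB (t base rem : Int) (st : Int × Int × List (Int × Int)) (_idx : Int) :
    Int × Int × List (Int × Int) :=
  let start := st.1
  let acc := st.2.1
  let out := st.2.2
  let size := base
  let acc := acc + rem
  let p := if acc ≥ t then (acc - t, size + 1) else (acc, size)
  (start + p.2, p.1, out ++ [(start, start + p.2)])

def even_spans_py_alt (length : Int) (target : Int) : List (Int × Int) :=
  if length ≤ 0 then []
  else
    let t := max 1 (min target length)
    let base := PySem.Int.floordiv length t
    let rem := PySem.Int.mod length t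
    ((PySem.List.pyRange 0 t 1).foldl (pvStepB t base rem) (0, 0, [])).2.2

-- ===== PRECONDITION & SPEC =====
def Spec_even_spans_py (length : Int) (target : Int) (out : List (Int × Int)) : Prop := out = even_spans_py_alt length target
instance (length : Int) (target : Int) (out : List (Int × Int)) : Decidable (Spec_even_spans_py length target out) := by unfold Spec_even_spans_py; infer_instance

-- ===== CLAIM (what is proved, stated in full; the proofs are below) =====
def Claim_equal_even_spans_py : Prop := ∀ (length : Int) (target : Int), Dom_even_spans_py length target → Spec_even_spans_py length target (even_spans_py length target)

-- ===== LEMMAS AND PROOFS =====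

-- loop invariant: after n iterations B's state is (n*L//t, (n*L)%t, A's output so far)
theorem pv_loop_eq (L t : Int) (ht : 0 < t) (htL : t ≤ L) (n : Nat) :
    (List.map (fun k : Nat => (k : Int)) (List.range n)).foldl
        (pvStepB t (PySem.Int.floordiv L t) (PySem.Int.mod L t)) (0, 0, []) =
      (PySem.Int.floordiv ((n : Int) * L) t, PySem.Int.mod ((n : Int) * L) t,
        (List.map (fun k : Nat => (k : Int)) (List.range n)).foldl (pvStepA L t) []) := by
  induction n with
  | zero =>
      simp [PySem.Int.floordiv, PySem.Int.mod]
  | succ n ih =>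
      simp only [List.range_succ, List.map_append, List.foldl_append]
      rw [ih]
      simp only [List.map_cons, List.map_nil, List.foldl_cons, List.foldl_nil, pvStepA, pvStepB]
      push_cast
      rw [show ((n : Int) + 1) * L = (n : Int) * L + L from by ring]
      have hq := PySem.Int.floordiv_mul_add_mod ((n : Int) * L) t
      have hr0 := PySem.Int.mod_nonneg ((n : Int) * L) ht
      have hr1 := PySem.Int.mod_lt ((n : Int) * L) ht
      have hb := PySem.Int.floordiv_mul_add_mod L t
      have hs0 := PySem.Int.mod_nonneg L ht
      have hs1 := PySem.Int.mod_lt L ht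
      have hq' := PySem.Int.floordiv_mul_add_mod ((n : Int) * L + L) t
      have hr0' := PySem.Int.mod_nonneg ((n : Int) * L + L) ht
      have hr1' := PySem.Int.mod_lt ((n : Int) * L + L) ht
      set q := PySem.Int.floordiv ((n : Int) * L) t with hqdef
      set r := PySem.Int.mod ((n : Int) * L) t with hrdef
      set b := PySem.Int.floordiv L t with hbdef
      set s := PySem.Int.mod L t with hsdef
      set q' := PySem.Int.floordiv ((n : Int) * L + L) t with hq'def
      set r' := PySem.Int.mod ((n : Int) * L + L) t with hr'def
      have hqlt : q < q' := by nlinarith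
      have hgt : ¬ q' ≤ q := by omega
      simp only [hgt, if_false, ge_iff_le]
      by_cases hc : t ≤ r + s
      · rw [if_pos hc]
        have h1 : q + (b + 1) = q' := by nlinarith
        have h2 : r + s - t = r' := by nlinarith
        simp [h1, h2]
      · rw [if_neg hc]
        have h1 : q + b = q' := by nlinarith
        have h2 : r + s = r' := by nlinarith
        simp [h1, h2]

-- ===== VERDICT (by name: the statement is the Claim_ definition above) =====
theorem even_spans_py_spec : Claim_equal_even_spans_py := by
  intro length target _
  unfold Spec_even_spans_py even_spans_py even_spans_py_alt
  by_cases h : length ≤ 0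
  · simp [h]
  · simp only [h, if_false]
    have ht : (0 : Int) < max 1 (min target length) := by omega
    have htL : max 1 (min target length) ≤ length := by omega
    have htn : max 1 (min target length) = ((max 1 (min target length)).toNat : Int) := by omega
    rw [htn, PySem.List.pyRange_zero_natCast,
      pv_loop_eq length ((max 1 (min target length)).toNat : Int) (by omega) (by omega)]
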